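-- pv_equiv track=rewrite | github.com/hermansaksono/basics | algorithms/quick_sort.py | get_largers
-- ===== SOURCE A (Python) =====
-- def get_largers(list_of_numbers, pivot):
--     """Return list of numbers larger than pivot"""
--     # type: (list[int], int) -> list[int]
--     if len(list_of_numbers) == 0:
--         return []
--     else:
--         if list_of_numbers[0] >= pivot:
--             return [list_of_numbers[0]] + get_largers(list_of_numbers[1:], pivot)
--         else:
--             return get_largers(list_of_numbers[1:], pivot)
-- ===== SOURCE B (Python) =====
-- def get_largers(list_of_numbers, pivot):
--     """Return list of numbers larger than pivot"""
--     result = []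
--     for n in list_of_numbers:
--         if n >= pivot:
--             result.append(n)
--     return result
-- ===== Notes on version B (the rewrite author's own statement) =====
-- stated objective: simpler
-- what changed: Replaced A's structural recursion over the sliced tail (which copies the remaining list at every step) with a single left-to-right accumulator loop appending qualifying elements.
import Mathlib
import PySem

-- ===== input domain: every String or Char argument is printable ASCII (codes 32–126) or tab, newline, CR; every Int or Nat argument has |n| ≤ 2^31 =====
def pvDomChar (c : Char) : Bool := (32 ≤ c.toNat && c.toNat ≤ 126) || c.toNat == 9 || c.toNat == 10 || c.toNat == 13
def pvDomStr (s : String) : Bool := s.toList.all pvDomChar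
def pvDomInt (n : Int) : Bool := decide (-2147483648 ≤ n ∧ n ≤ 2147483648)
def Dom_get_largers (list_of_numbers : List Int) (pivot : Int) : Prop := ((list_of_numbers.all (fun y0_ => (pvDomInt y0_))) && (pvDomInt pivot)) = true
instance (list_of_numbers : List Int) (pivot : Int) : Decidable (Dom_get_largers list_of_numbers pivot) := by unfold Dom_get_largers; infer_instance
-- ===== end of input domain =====

-- ===== PORT A =====
-- B replaces A's recursion-over-tail with one left-to-right accumulator loop.
def get_largers (list_of_numbers : List Int) (pivot : Int) : List Int :=
  match list_of_numbers with
  | [] => []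
  | x :: rest =>
    if x ≥ pivot then [x] ++ get_largers rest pivot
    else get_largers rest pivot

-- ===== PORT B =====
def get_largers_alt (list_of_numbers : List Int) (pivot : Int) : List Int :=
  list_of_numbers.foldl (fun result n => if n ≥ pivot then result ++ [n] else result) []

-- ===== PRECONDITION & SPEC =====
def Spec_get_largers (list_of_numbers : List Int) (pivot : Int) (out : List Int) : Prop := out = get_largers_alt list_of_numbers pivot
instance (list_of_numbers : List Int) (pivot : Int) (out : List Int) : Decidable (Spec_get_largers list_of_numbers pivot out) := by unfold Spec_get_largers; infer_instance

-- ===== CLAIM (what is proved, stated in full; the proofs are below) =====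
def Claim_equal_get_largers : Prop := ∀ (list_of_numbers : List Int) (pivot : Int), Dom_get_largers list_of_numbers pivot → Spec_get_largers list_of_numbers pivot (get_largers list_of_numbers pivot)

-- ===== LEMMAS AND PROOFS =====

-- ===== VERDICT (by name: the statement is the Claim_ definition above) =====
theorem alt_foldl_acc (xs : List Int) (pivot : Int) (acc : List Int) :
    xs.foldl (fun result n => if n ≥ pivot then result ++ [n] else result) acc
      = acc ++ get_largers xs pivot := by
  induction xs generalizing acc with
  | nil => simp [get_largers]
  | cons x rest ih =>
    simp only [List.foldl, get_largers]
    by_cases h : x ≥ pivot <;> simp [h, ih]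

theorem get_largers_spec : Claim_equal_get_largers := by
  intro xs pivot _
  unfold Spec_get_largers get_largers_alt
  simp [alt_foldl_acc]
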